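-- pv_equiv track=rewrite | github.com/Byeonjinha/codingTest | CodingTest/[BE] 네이버파이낸셜 백엔드 부문 2차 코딩테스트 for 변진하.py | solution
-- ===== SOURCE A (Python) =====
-- def solution(id_list, k):
--     cus_dic = {}
--     answer = 0
--     for i in range(len(id_list)):
--         kk= list(set(id_list[i].split(" ")))
--         for i2 in range(len(kk)):
--             cus_dic[kk[i2]] = 0
--
--     for i in range(len(id_list)):
--         kk = list(set(id_list[i].split(" ")))
--         for i3 in range(len(kk)):
--             if cus_dic[kk[i3]] < k:
--                 cus_dic[kk[i3]] = cus_dic[kk[i3]] +1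
--     for i in cus_dic:
--         answer+=(cus_dic[i])
--
--     return answer
-- ===== SOURCE B (Python) =====
-- def solution(id_list, k):
--     # sort-then-scan: flatten per-line distinct tokens, sort, sum capped run lengths (no dict)
--     toks = sorted(t for line in id_list for t in set(line.split(" ")))
--     total = 0
--     run = 0
--     prev = None
--     for t in toks:
--         if t == prev:
--             run += 1
--         else:
--             total += max(0, min(run, k))
--             prev = t
--             run = 1
--     return total + max(0, min(run, k))
-- ===== Notes on version B (the rewrite author's own statement) =====
-- stated objective: alternative
-- what changed: B drops the dictionary entirely: it flattens the per-line distinct tokens into one list, sorts it, and computes the answer in a single scan that sums the capped length max(0, min(run, k)) of each run of equal tokens, instead of A's three dict passes (zero-init, capped increment, value sum).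
import Mathlib
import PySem

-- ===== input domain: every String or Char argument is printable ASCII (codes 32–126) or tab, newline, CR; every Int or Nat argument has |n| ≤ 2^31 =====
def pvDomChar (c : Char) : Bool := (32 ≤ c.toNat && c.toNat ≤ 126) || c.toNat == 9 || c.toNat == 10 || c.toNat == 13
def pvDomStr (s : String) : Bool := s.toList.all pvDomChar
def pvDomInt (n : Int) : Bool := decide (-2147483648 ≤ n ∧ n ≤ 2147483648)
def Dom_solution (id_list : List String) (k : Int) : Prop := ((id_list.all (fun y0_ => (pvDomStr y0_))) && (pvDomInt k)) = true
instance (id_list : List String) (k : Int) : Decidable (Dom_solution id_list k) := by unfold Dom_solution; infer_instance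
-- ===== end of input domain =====

-- B replaces A's dict passes by sort-then-scan: flatten the per-line distinct tokens, sort them,
-- and sum the capped run lengths in one scan (objective: alternative — no dictionary at all).

-- ===== PORT A =====
-- set(id_list[i].split(" ")): the final answer is a sum over dict values, so it does not depend on set iteration order.
def pvToks (line : String) : List String :=
  PySem.Set.ofList ((PySem.Str.split? line " ").getD [])

-- cus_dic[kk[i3]] is always present (pass 1 inserted every token), so getD _ 0 is exact.
def solution (id_list : List String) (k : Int) : Int :=
  let cus0 : PySem.Dict String Int :=
    id_list.foldl (fun d line => (pvToks line).foldl (fun d t => d.insert t 0) d) PySem.Dict.empty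
  let cus1 : PySem.Dict String Int :=
    id_list.foldl (fun d line =>
      (pvToks line).foldl (fun d t =>
        if d.getD t 0 < k then d.insert t (d.getD t 0 + 1) else d) d) cus0
  cus1.keys.foldl (fun a t => a + cus1.getD t 0) 0

-- ===== PORT B =====
-- max(0, min(run, k))
def pvClamp (k v : Int) : Int := max 0 (min v k)

-- the loop body of Source B: (total, run, prev) updated by token t
def pvStep (k : Int) (st : Int × Int × Option String) (t : String) : Int × Int × Option String :=
  if some t = st.2.2 then (st.1, st.2.1 + 1, st.2.2)
  else (st.1 + pvClamp k st.2.1, 1, some t)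

def solution_alt (id_list : List String) (k : Int) : Int :=
  let toks := PySem.List.sorted (id_list.flatMap pvToks) (fun t => t) false
  let st := toks.foldl (pvStep k) (0, 0, none)
  st.1 + pvClamp k st.2.1

-- ===== PRECONDITION & SPEC =====
def Spec_solution (id_list : List String) (k : Int) (out : Int) : Prop := out = solution_alt id_list k
instance (id_list : List String) (k : Int) (out : Int) : Decidable (Spec_solution id_list k out) := by unfold Spec_solution; infer_instance

-- ===== CLAIM (what is proved, stated in full; the proofs are below) =====
def Claim_equal_solution : Prop := ∀ (id_list : List String) (k : Int), Dom_solution id_list k → Spec_solution id_list k (solution id_list k)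

-- ===== LEMMAS AND PROOFS =====

-- the common reference value: for each distinct token, its clamped multiplicity
def pvF (k : Int) (S : List String) : Int := ∑ t ∈ S.toFinset, pvClamp k (S.count t)

-- "total, then clamp of the final run" of Source B's scan started from state st
def pvRes (k : Int) (st : Int × Int × Option String) (S : List String) : Int :=
  (S.foldl (pvStep k) st).1 + pvClamp k (S.foldl (pvStep k) st).2.1

-- a nested per-line fold over the lines' token sets is the fold over the flattened token list
theorem foldl_flat {β : Type} (g : β → String → β) (id_list : List String) (d : β) :
    id_list.foldl (fun d line => (pvToks line).foldl g d) d
      = (id_list.flatMap pvToks).foldl g d := by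
  induction id_list generalizing d with
  | nil => rfl
  | cons x xs ih => simp [List.flatMap_cons, List.foldl_append, ih]

-- pass 1 leaves every lookup (present key or default) at 0
theorem getD_pass1 (L : List String) (d : PySem.Dict String Int)
    (h : ∀ t, d.getD t 0 = 0) (t : String) :
    (L.foldl (fun d t => d.insert t 0) d).getD t 0 = 0 := by
  induction L generalizing d with
  | nil => exact h t
  | cons x xs ih =>
      refine ih _ (fun u => ?_)
      rw [PySem.Dict.getD_insert]
      split <;> simp [h]

-- the capped-increment fold paired against the plain counting fold, per key
theorem getD_pair (k : Int) (L : List String)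
    (dA dB : PySem.Dict String Int) (t : String)
    (hg : dA.getD t 0 = max 0 (min (dB.getD t 0) k)) (hb : 0 ≤ dB.getD t 0) :
    (L.foldl (fun d t => if d.getD t 0 < k then d.insert t (d.getD t 0 + 1) else d) dA).getD t 0
      = max 0 (min ((L.foldl (fun d t => d.insert t (d.getD t 0 + 1)) dB).getD t 0) k) := by
  induction L generalizing dA dB with
  | nil => exact hg
  | cons x xs ih =>
      simp only [List.foldl_cons]
      apply ih
      · by_cases hx : t = x
        · subst hx
          rw [PySem.Dict.getD_insert_self]
          split_ifs with hlt
          · rw [PySem.Dict.getD_insert_self]; omega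
          · omega
        · rw [PySem.Dict.getD_insert_of_ne _ _ _ hx]
          by_cases hlt : dA.getD x 0 < k
          · rw [if_pos hlt, PySem.Dict.getD_insert_of_ne _ _ _ hx]; exact hg
          · rw [if_neg hlt]; exact hg
      · rw [PySem.Dict.getD_insert]
        split_ifs with h
        · subst h; omega
        · omega

-- pass 2 never adds a key: every token it sees is already present
theorem keys_pass2 (k : Int) (L : List String) (d : PySem.Dict String Int)
    (h : ∀ u ∈ L, d.contains u = true) :
    (L.foldl (fun d t => if d.getD t 0 < k then d.insert t (d.getD t 0 + 1) else d) d).keys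
      = d.keys := by
  induction L generalizing d with
  | nil => rfl
  | cons x xs ih =>
      have hx : d.contains x = true := h x (by simp)
      have step : ∀ u ∈ xs,
          (if d.getD x 0 < k then d.insert x (d.getD x 0 + 1) else d).contains u = true := by
        intro u hu
        split
        · rw [PySem.Dict.contains_insert]; simp [h u (by simp [hu])]
        · exact h u (by simp [hu])
      simp only [List.foldl_cons]
      rw [ih _ step]
      split
      · exact PySem.Dict.keys_insert_of_contains _ _ hx
      · rfl

-- A computes the clamped-multiplicity sum over the distinct flattened tokens
theorem solution_eq_pvF (id_list : List String) (k : Int) :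
    solution id_list k = pvF k (id_list.flatMap pvToks) := by
  unfold solution pvF
  simp only [foldl_flat]
  set L := id_list.flatMap pvToks with hL
  have hcounter : L.foldl (fun d t => d.insert t (d.getD t 0 + 1))
      (PySem.Dict.empty : PySem.Dict String Int) = PySem.Dict.counter L :=
    PySem.Dict.foldl_insert_getD_add_one_eq_counter L
  set dA := L.foldl (fun d t => d.insert t 0) (PySem.Dict.empty : PySem.Dict String Int) with hdA
  have h0 : ∀ t, dA.getD t 0 = 0 := fun t =>
    getD_pass1 L _ (fun u => by simp [PySem.Dict.getD_empty]) t
  have hk0 : dA.keys = PySem.Set.ofList L := by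
    rw [hdA, PySem.Dict.keys_foldl_insert]
    simp [PySem.Dict.keys_empty, PySem.Set.update, PySem.Set.ofList_eq_foldl]
  have hcont : ∀ u ∈ L, dA.contains u = true := by
    intro u hu
    rw [PySem.Dict.contains_iff_mem_keys, hk0]
    exact (PySem.Set.mem_ofList L u).mpr hu
  set dC := L.foldl (fun d t => if d.getD t 0 < k then d.insert t (d.getD t 0 + 1) else d) dA with hdC
  have hkeys : dC.keys = PySem.Set.ofList L := by
    rw [hdC, keys_pass2 k L dA hcont, hk0]
  have hv : ∀ t, dC.getD t 0 = pvClamp k (L.count t) := by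
    intro t
    rw [hdC, getD_pair k L dA PySem.Dict.empty t
      (by simp [h0, PySem.Dict.getD_empty]) (by simp [PySem.Dict.getD_empty]),
      hcounter, PySem.Dict.getD_counter, pvClamp]
  rw [PySem.List.foldl_add (g := fun t => dC.getD t 0), hkeys]
  have hfin : (PySem.Set.ofList L).toFinset = L.toFinset := by
    ext t; simp [PySem.Set.mem_ofList]
  rw [← hfin, ← List.sum_toFinset _ (PySem.Set.nodup_ofList L)]
  rw [Finset.sum_congr rfl (fun t _ => hv t)]
  ring

-- total offset: the scan's total component is additive in its starting total
theorem pvRes_offset (k : Int) (S : List String) :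
    ∀ (a c r : Int) (p : Option String),
      S.foldl (pvStep k) (a + c, r, p)
        = ((S.foldl (pvStep k) (a, r, p)).1 + c, (S.foldl (pvStep k) (a, r, p)).2) := by
  induction S with
  | nil => intro a c r p; rfl
  | cons t S ih =>
      intro a c r p
      simp only [List.foldl_cons, pvStep]
      by_cases h : some t = p
      · simp only [if_pos h]; exact ih a c (r + 1) p
      · simp only [if_neg h]
        have : a + c + pvClamp k r = (a + pvClamp k r) + c := by ring
        rw [this]; exact ih (a + pvClamp k r) c 1 (some t)

-- the scan from inside a run of x, over a tail in which equal tokens are adjacent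
theorem pvRes_run (k : Int) (S : List String) :
    ∀ (x : String) (r : Int), (x :: S).Pairwise (· ≤ ·) →
      pvRes k (0, r, some x) S
        = pvClamp k (r + S.count x) + ∑ t ∈ S.toFinset.erase x, pvClamp k (S.count t) := by
  induction S with
  | nil => intro x r _; simp [pvRes, pvClamp]
  | cons y S ih =>
      intro x r h
      by_cases hyx : y = x
      · subst hyx
        have hstep : pvStep k (0, r, some y) y = (0, r + 1, some y) := by
          simp [pvStep]
        have h1 : pvRes k (0, r, some y) (y :: S) = pvRes k (0, r + 1, some y) S := by
          simp only [pvRes, List.foldl_cons, hstep]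
        rw [h1, ih y (r + 1) h.of_cons, List.count_cons_self, List.toFinset_cons,
          Finset.erase_insert_eq_erase]
        have hsum : ∑ t ∈ S.toFinset.erase y, pvClamp k ((y :: S).count t)
            = ∑ t ∈ S.toFinset.erase y, pvClamp k (S.count t) :=
          Finset.sum_congr rfl (fun t ht => by
            rw [List.count_cons_of_ne (Finset.ne_of_mem_erase ht).symm])
        rw [hsum, show r + ((S.count y + 1 : Nat) : Int) = r + 1 + (S.count y : Int) from by
          push_cast; ring]
      · -- y starts a new run; x never occurs again
        obtain ⟨hall, htail⟩ := List.pairwise_cons.mp h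
        have hxy : x ≤ y := hall y (by simp)
        have hnot : x ∉ y :: S := by
          intro hmem
          rcases List.mem_cons.mp hmem with h1 | h2
          · exact hyx h1.symm
          · exact hyx (le_antisymm ((List.pairwise_cons.mp htail).1 x h2) hxy)
        have hstep : pvStep k (0, r, some x) y = (0 + pvClamp k r, 1, some y) := by
          simp [pvStep, fun hh : y = x => hyx hh]
        have h1 : pvRes k (0, r, some x) (y :: S) = pvClamp k r + pvRes k (0, 1, some y) S := by
          simp only [pvRes, List.foldl_cons, hstep, pvRes_offset]
          ring
        rw [h1, ih y 1 htail]
        have hxfin : x ∉ (y :: S).toFinset := by simpa using hnot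
        rw [List.count_eq_zero.mpr hnot, Finset.erase_eq_of_notMem hxfin]
        have hy : y ∈ (y :: S).toFinset := by simp
        rw [← Finset.add_sum_erase _ _ hy, List.toFinset_cons, Finset.erase_insert_eq_erase,
          List.count_cons_self]
        have hsum : ∑ t ∈ S.toFinset.erase y, pvClamp k ((y :: S).count t)
            = ∑ t ∈ S.toFinset.erase y, pvClamp k (S.count t) :=
          Finset.sum_congr rfl (fun t ht => by
            rw [List.count_cons_of_ne (Finset.ne_of_mem_erase ht).symm])
        rw [hsum, show ((S.count y + 1 : Nat) : Int) = 1 + (S.count y : Int) from by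
          push_cast; ring]
        simp only [Nat.cast_zero, add_zero]

-- the full scan on a list in which equal tokens are adjacent computes pvF
theorem pvRes_sorted (k : Int) (S : List String) (h : S.Pairwise (· ≤ ·)) :
    pvRes k (0, 0, none) S = pvF k S := by
  cases S with
  | nil => simp [pvRes, pvF, pvClamp]
  | cons x S =>
      have hc0 : (0 : Int) + pvClamp k 0 = 0 := by
        simp only [pvClamp]; omega
      have hstep : pvStep k (0, 0, none) x = (0, 1, some x) := by
        simp only [pvStep, reduceCtorEq, if_false]
        rw [hc0]
      have h1 : pvRes k (0, 0, none) (x :: S) = pvRes k (0, 1, some x) S := by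
        simp only [pvRes, List.foldl_cons, hstep]
      rw [h1, pvRes_run k S x 1 h, pvF]
      have hx : x ∈ (x :: S).toFinset := by simp
      rw [← Finset.add_sum_erase _ _ hx, List.toFinset_cons, Finset.erase_insert_eq_erase,
        List.count_cons_self]
      have hsum : ∑ t ∈ S.toFinset.erase x, pvClamp k ((x :: S).count t)
          = ∑ t ∈ S.toFinset.erase x, pvClamp k (S.count t) :=
        Finset.sum_congr rfl (fun t ht => by
          rw [List.count_cons_of_ne (Finset.ne_of_mem_erase ht).symm])
      rw [hsum, show ((S.count x + 1 : Nat) : Int) = 1 + (S.count x : Int) from by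
        push_cast; ring]

-- pvF is invariant under permutation (sorting)
theorem pvF_perm (k : Int) (S L : List String) (h : S.Perm L) : pvF k S = pvF k L := by
  unfold pvF
  rw [List.toFinset_eq_of_perm _ _ h]
  exact Finset.sum_congr rfl (fun t _ => by rw [h.count_eq])

theorem solution_eq (id_list : List String) (k : Int) :
    solution id_list k = solution_alt id_list k := by
  rw [solution_eq_pvF]
  show pvF k (id_list.flatMap pvToks) = pvRes k (0, 0, none)
    (PySem.List.sorted (id_list.flatMap pvToks) (fun t => t) false)
  rw [pvRes_sorted k _ (by simpa using PySem.List.sorted_pairwise (id_list.flatMap pvToks) (fun t => t))]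
  exact (pvF_perm k _ _ (PySem.List.sorted_perm (id_list.flatMap pvToks) (fun t => t) false)).symm

-- ===== VERDICT (by name: the statement is the Claim_ definition above) =====
theorem solution_spec : Claim_equal_solution := by
  intro id_list k _
  unfold Spec_solution
  exact solution_eq id_list k
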